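-- pv_equiv track=rewrite | github.com/JasonMidBlock/Python | A7/Q1.py | genStatesSorted
-- ===== SOURCE A (Python) =====
-- def genStatesSorted(order):
--     """
--     A function to generate a set of all possible states (E/W,E/W,E/W,E/W)
--     Input: None
--     Output: Return a tuple of all possible states (E/W,E/W,E/W,E/W) in two sorted orders:
--             - Order = 0: alphabetical order
--             - Order = 1: reverse alphabetical order
--     """
--
--     if order == 0:
--         direction = ["E","W"]
--     else:
--         direction = ["W","E"]
--
--     states = []
--     for i in direction:
--         for j in direction:
--             for k in direction:
--                 for l in direction:
--                     aState = i + j + k + l  # Concatenate the four locations into a string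
--                     states.append(aState)   # Add the newly created state to the set of states
--
--     return tuple(states)
-- ===== SOURCE B (Python) =====
-- def genStatesSorted(order):
--     direction = ["E", "W"] if order == 0 else ["W", "E"]
--     states = [''.join(direction[(n >> s) & 1] for s in (3, 2, 1, 0))
--               for n in range(16)]
--     return tuple(states)
-- ===== Notes on version B (the rewrite author's own statement) =====
-- stated objective: simpler
-- what changed: Replaces the four nested loops over the direction list by one flat loop over the integers 0..15, decoding each state from the four bits of the counter (bit 3 = outermost position), which preserves the exact order.
import Mathlib
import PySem

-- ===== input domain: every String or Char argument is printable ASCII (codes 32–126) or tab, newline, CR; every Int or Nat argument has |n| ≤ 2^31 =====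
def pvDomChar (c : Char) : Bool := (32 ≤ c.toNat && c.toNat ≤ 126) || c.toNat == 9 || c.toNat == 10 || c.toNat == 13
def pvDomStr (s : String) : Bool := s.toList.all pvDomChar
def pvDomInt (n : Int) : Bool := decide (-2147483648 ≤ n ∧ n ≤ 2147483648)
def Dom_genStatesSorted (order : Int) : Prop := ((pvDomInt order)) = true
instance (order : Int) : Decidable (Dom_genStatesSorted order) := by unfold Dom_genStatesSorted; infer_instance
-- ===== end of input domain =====

-- ===== PORT A =====
-- B replaces four nested loops by one flat 0..15 loop with bit decoding (objective: simpler).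
def genStatesSorted (order : Int) : List String :=
  let direction : List String := if order = 0 then ["E", "W"] else ["W", "E"]
  direction.foldl (fun states i =>
    direction.foldl (fun states j =>
      direction.foldl (fun states k =>
        direction.foldl (fun states l =>
          states ++ [i ++ j ++ k ++ l]) states) states) states) []

-- ===== PORT B =====
def genStatesSorted_alt (order : Int) : List String :=
  let direction : List String := if order = 0 then ["E", "W"] else ["W", "E"]
  (List.range 16).map (fun n =>
    String.join ([3, 2, 1, 0].map (fun s => direction.getD ((n >>> s) &&& 1) "")))

-- ===== PRECONDITION & SPEC =====
def Spec_genStatesSorted (order : Int) (out : List String) : Prop := out = genStatesSorted_alt order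
instance (order : Int) (out : List String) : Decidable (Spec_genStatesSorted order out) := by unfold Spec_genStatesSorted; infer_instance

-- ===== CLAIM (what is proved, stated in full; the proofs are below) =====
def Claim_equal_genStatesSorted : Prop := ∀ (order : Int), Dom_genStatesSorted order → Spec_genStatesSorted order (genStatesSorted order)

-- ===== LEMMAS AND PROOFS =====

-- ===== VERDICT (by name: the statement is the Claim_ definition above) =====
theorem genStatesSorted_spec : Claim_equal_genStatesSorted := by
  intro order _
  unfold Spec_genStatesSorted genStatesSorted genStatesSorted_alt
  by_cases h : order = 0 <;> simp only [h, if_pos, if_neg, not_false_iff] <;> rfl
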